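-- pv_equiv track=rewrite | github.com/SK-Rookies-Module-2/Vuln-Inspector | plugins/remote/kisa_u32/main.py | _is_ignored_home
-- ===== SOURCE A (Python) =====
-- from typing import Dict, List, Optional, Sequence, Tuple
--
-- def _is_ignored_home(raw_home: str, ignore_set: set[str], prefixes: Sequence[str]) -> bool:
--     if not raw_home:
--         return False
--     if raw_home in ignore_set:
--         return True
--     for prefix in prefixes:
--         if not prefix:
--             continue
--         if raw_home == prefix or raw_home.startswith(prefix + "/"):
--             return True
--     return False
-- ===== SOURCE B (Python) =====
-- def _is_ignored_home(raw_home, ignore_set, prefixes):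
--     if not raw_home:
--         return False
--     if raw_home in ignore_set:
--         return True
--     prefix_set = set(p for p in prefixes if p)
--     if raw_home in prefix_set:
--         return True
--     for i, ch in enumerate(raw_home):
--         if ch == '/' and raw_home[:i] in prefix_set:
--             return True
--     return False
-- ===== Notes on version B (the rewrite author's own statement) =====
-- stated objective: alternative
-- what changed: Instead of scanning the prefix list and testing startswith for each entry, B builds a set of the non-empty prefixes once and enumerates the '/'-boundary ancestors of raw_home, testing each by set membership.
import Mathlib
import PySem

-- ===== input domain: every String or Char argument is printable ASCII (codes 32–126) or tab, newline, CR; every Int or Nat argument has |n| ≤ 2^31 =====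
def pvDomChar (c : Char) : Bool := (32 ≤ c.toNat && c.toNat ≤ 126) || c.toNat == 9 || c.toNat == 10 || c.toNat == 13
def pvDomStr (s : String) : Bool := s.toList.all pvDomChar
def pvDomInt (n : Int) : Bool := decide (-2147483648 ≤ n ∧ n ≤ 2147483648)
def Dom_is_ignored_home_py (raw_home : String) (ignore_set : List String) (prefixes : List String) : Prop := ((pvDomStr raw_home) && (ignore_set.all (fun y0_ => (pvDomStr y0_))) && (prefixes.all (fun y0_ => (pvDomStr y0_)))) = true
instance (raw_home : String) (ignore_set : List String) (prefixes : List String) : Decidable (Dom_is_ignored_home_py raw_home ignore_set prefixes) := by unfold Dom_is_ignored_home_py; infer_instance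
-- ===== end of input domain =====

-- B replaces A's scan of the prefix list (startswith per entry) with a set of the
-- non-empty prefixes, looked up at each '/'-boundary ancestor of raw_home (alternative decomposition).

-- ===== PORT A =====
def is_ignored_home_py (raw_home : String) (ignore_set : List String) (prefixes : List String) : Bool :=
  if raw_home = "" then false
  else if ignore_set.contains raw_home then true
  else prefixes.any (fun pfx =>
    if pfx = "" then false
    else raw_home == pfx || PySem.Str.startswith raw_home (pfx ++ "/"))

-- ===== PORT B =====
def is_ignored_home_py_alt (raw_home : String) (ignore_set : List String) (prefixes : List String) : Bool :=
  if raw_home = "" then false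
  else if ignore_set.contains raw_home then true
  else
    let prefix_set : PySem.Set String := PySem.Set.ofList (prefixes.filter (fun p => !(p = "")))
    if PySem.Set.contains prefix_set raw_home then true
    else (PySem.List.enumerate raw_home.toList).any (fun pr =>
      pr.2 == '/' && PySem.Set.contains prefix_set (PySem.Str.slice raw_home none (some pr.1)))

-- ===== PRECONDITION & SPEC =====
def Spec_is_ignored_home_py (raw_home : String) (ignore_set : List String) (prefixes : List String) (out : Bool) : Prop := out = is_ignored_home_py_alt raw_home ignore_set prefixes
instance (raw_home : String) (ignore_set : List String) (prefixes : List String) (out : Bool) : Decidable (Spec_is_ignored_home_py raw_home ignore_set prefixes out) := by unfold Spec_is_ignored_home_py; infer_instance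

-- ===== CLAIM (what is proved, stated in full; the proofs are below) =====
def Claim_equal_is_ignored_home_py : Prop := ∀ (raw_home : String) (ignore_set : List String) (prefixes : List String), Dom_is_ignored_home_py raw_home ignore_set prefixes → Spec_is_ignored_home_py raw_home ignore_set prefixes (is_ignored_home_py raw_home ignore_set prefixes)

-- ===== LEMMAS AND PROOFS =====

-- Core boundary lemma: l ++ ['/'] is a prefix of cs iff some index k holds '/' with cs.take k = l.
theorem pv_prefix_slash_iff (l cs : List Char) :
    (l ++ ['/']) <+: cs ↔ ∃ k, ∃ _ : k < cs.length, cs[k] = '/' ∧ cs.take k = l := by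
  constructor
  · rintro ⟨t, ht⟩
    have hcs : cs = l ++ '/' :: t := by rw [← ht]; simp
    subst hcs
    refine ⟨l.length, by simp only [List.length_append, List.length_cons]; omega, ?_, ?_⟩
    · rw [List.getElem_append_right (Nat.le_refl _)]; simp
    · simp [List.take_left (l₁ := l) (l₂ := '/' :: t)]
  · rintro ⟨k, hk, hc, ht⟩
    refine ⟨cs.drop (k + 1), ?_⟩
    have hdrop := List.getElem_cons_drop (as := cs) (i := k) hk
    rw [hc] at hdrop
    calc (l ++ ['/']) ++ cs.drop (k + 1) = l ++ '/' :: cs.drop (k + 1) := by simp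
    _ = cs.take k ++ cs.drop k := by rw [ht, hdrop]
    _ = cs := List.take_append_drop k cs

theorem pv_any_eq (raw_home : String) (prefixes : List String) :
    prefixes.any (fun pfx =>
      if pfx = "" then false
      else raw_home == pfx || PySem.Str.startswith raw_home (pfx ++ "/"))
    = (PySem.Set.contains (PySem.Set.ofList (prefixes.filter (fun p => !(p = "")))) raw_home
      || (PySem.List.enumerate raw_home.toList).any (fun pr =>
          pr.2 == '/' && PySem.Set.contains (PySem.Set.ofList (prefixes.filter (fun p => !(p = ""))))
            (PySem.Str.slice raw_home none (some pr.1)))) := by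
  rw [Bool.eq_iff_iff]
  simp only [List.any_eq_true, Bool.or_eq_true, Bool.and_eq_true, beq_iff_eq,
    PySem.Set.contains_iff, PySem.Set.mem_ofList, List.mem_filter,
    PySem.List.mem_enumerate_iff, Bool.not_eq_eq_eq_not, Bool.not_true,
    decide_eq_false_iff_not]
  constructor
  · rintro ⟨p, hp, hcond⟩
    split_ifs at hcond with h0
    have hcond' : raw_home = p ∨ PySem.Str.startswith raw_home (p ++ "/") = true := by
      simpa using hcond
    rcases hcond' with heq | hsw
    · exact Or.inl ⟨by rwa [heq], by rw [heq]; exact h0⟩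
    · have hpre : (p.toList ++ ['/']) <+: raw_home.toList := by
        have := (PySem.Chars.startswith_iff raw_home.toList (p ++ "/").toList).mp
          (by simpa using hsw)
        simpa using this
      rcases (pv_prefix_slash_iff p.toList raw_home.toList).mp hpre with ⟨k, hk, hc, ht⟩
      refine Or.inr ⟨(0 + (k : Int), raw_home.toList[k]), ⟨k, hk, rfl⟩, by simpa using hc, ?_⟩
      have hsl : PySem.Str.slice raw_home none (some ((0 : Int) + (k : Int))) = p := by
        rw [← String.toList_inj, PySem.Str.toList_slice]
        simp only [zero_add]
        rw [PySem.Chars.slice_eq_listSlice, PySem.List.slice_to_natCast]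
        exact ht
      rw [hsl]
      exact ⟨hp, h0⟩
  · rintro (⟨hmem, h0⟩ | ⟨pr, ⟨k, hk, hpr⟩, hch, hmem, h0⟩)
    · exact ⟨raw_home, hmem, by rw [if_neg h0]; simp⟩
    · subst hpr
      simp only at hch hmem h0 ⊢
      set p := PySem.Str.slice raw_home none (some ((0 : Int) + (k : Int))) with hp
      refine ⟨p, hmem, ?_⟩
      have hsl : p.toList = raw_home.toList.take k := by
        rw [hp, PySem.Str.toList_slice]
        simp only [zero_add]
        rw [PySem.Chars.slice_eq_listSlice, PySem.List.slice_to_natCast]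
      have hsw : PySem.Str.startswith raw_home (p ++ "/") = true := by
        simp only [PySem.Str.startswith_eq]
        rw [PySem.Chars.startswith_iff]
        have hap : (p ++ "/").toList = p.toList ++ ['/'] := by simp
        rw [hap, hsl]
        exact (pv_prefix_slash_iff _ _).mpr ⟨k, hk, hch, rfl⟩
      rw [if_neg h0, hsw, Bool.or_true]

-- ===== VERDICT (by name: the statement is the Claim_ definition above) =====
theorem is_ignored_home_py_spec : Claim_equal_is_ignored_home_py := by
  intro raw_home ignore_set prefixes _
  unfold Spec_is_ignored_home_py is_ignored_home_py is_ignored_home_py_alt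
  split_ifs with h1 h2
  · rfl
  · rfl
  · rw [pv_any_eq raw_home prefixes]
    by_cases hc : PySem.Set.contains (PySem.Set.ofList (prefixes.filter (fun p => !(p = "")))) raw_home = true
    · rw [if_pos hc, hc, Bool.true_or]
    · rw [if_neg hc, Bool.or_eq_right_iff_imp.mpr (fun h => absurd h hc)]
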